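-- pv_equiv track=rewrite | github.com/git-ay/dats5980 | clue_causality.py | is_token_clue
-- ===== SOURCE A (Python) =====
-- def is_token_clue(doc:list[str]) -> list[bool]:
--
--     '''
--     Args:
--
--         docs : list[str]
--             A sentence containing words (in str).
--
--     Returns:
--
--         is_clue : list[bool]
--             A list containing True/False corresponding to the words.
--             True if a word is a clue.
--             False if a word is not a clue.
--
--     '''
--
--     ENG_CLUES_1 = set([
--         'because', 'after', 'as', 'from', 'for',
--         'since', 'with', 'consequently', 'therefore',
--         'accordingly', 'thus', 'so', 'hence', 'affected', 'will'
--     ]) # Should we add `will *` for all *?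
--     ENG_CLUES_2 = set([
--         'because of', 'due to', 'for the reason that', 'meant that', 'prompted by', 'helped by', 'fuelled by', 'partly on', 'owing to'
--     ])
--     ENG_CLUES_3 = set([
--         'as a result', 'as a consequence', 'was aided by', 'for this reason'
--     ])
--
--     doc = [ token.lower() for token in doc ]
--
--     is_clue = [ False ] * len(doc)
--     for i, token in enumerate(doc):
--
--         if token in ENG_CLUES_1:
--             is_clue[ i ] = True
--
--         if i >= 1:
--             prev1_token = doc[ i-1 ]
--             if f'{prev1_token} {token}' in ENG_CLUES_2:
--                 is_clue[ i-1 ] = is_clue[ i ] = True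
--
--         if i >= 2:
--             prev2_token = doc[ i-2 ]
--             if f'{prev2_token} {prev1_token} {token}' in ENG_CLUES_3:
--                 is_clue[ i-2 ] = is_clue[ i-1 ] = is_clue[ i ] = True
--
--     return is_clue
-- ===== SOURCE B (Python) =====
-- def is_token_clue(doc: list[str]) -> list[bool]:
--     ENG_CLUES_1 = {
--         'because', 'after', 'as', 'from', 'for',
--         'since', 'with', 'consequently', 'therefore',
--         'accordingly', 'thus', 'so', 'hence', 'affected', 'will'
--     }
--     ENG_CLUES_2 = {
--         'because of', 'due to', 'for the reason that', 'meant that', 'prompted by',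
--         'helped by', 'fuelled by', 'partly on', 'owing to'
--     }
--     ENG_CLUES_3 = {
--         'as a result', 'as a consequence', 'was aided by', 'for this reason'
--     }
--
--     toks = [t.lower() for t in doc]
--     n = len(toks)
--
--     def big(j):
--         # the 2-token window starting at j matches a bigram clue
--         return 0 <= j and j + 1 < n and f'{toks[j]} {toks[j + 1]}' in ENG_CLUES_2
--
--     def tri(j):
--         # the 3-token window starting at j matches a trigram clue
--         return 0 <= j and j + 2 < n and f'{toks[j]} {toks[j + 1]} {toks[j + 2]}' in ENG_CLUES_3
--
--     # a token is a clue iff it is a unigram clue or lies inside a matching window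
--     return [toks[i] in ENG_CLUES_1
--             or big(i - 1) or big(i)
--             or tri(i - 2) or tri(i - 1) or tri(i)
--             for i in range(n)]
-- ===== Notes on version B (the rewrite author's own statement) =====
-- stated objective: alternative
-- what changed: Replaces A's stateful back-marking loop (mutating is_clue at i, i-1, i-2 while scanning) with a pure per-position computation: each output position is an OR of window predicates (unigram at i, bigram windows starting at i-1/i, trigram windows starting at i-2/i-1/i) over the lowercased tokens.
import Mathlib
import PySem

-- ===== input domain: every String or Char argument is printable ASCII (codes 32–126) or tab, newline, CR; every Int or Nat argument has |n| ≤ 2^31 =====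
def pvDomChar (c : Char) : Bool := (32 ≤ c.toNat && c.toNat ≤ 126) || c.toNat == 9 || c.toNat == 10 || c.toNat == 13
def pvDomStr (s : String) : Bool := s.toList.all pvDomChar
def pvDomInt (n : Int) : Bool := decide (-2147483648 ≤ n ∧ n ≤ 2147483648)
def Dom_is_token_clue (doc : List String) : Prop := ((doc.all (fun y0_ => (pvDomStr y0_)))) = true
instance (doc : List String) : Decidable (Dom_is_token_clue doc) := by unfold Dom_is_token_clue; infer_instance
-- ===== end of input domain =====

-- B replaces A's stateful back-marking loop by a pure per-position OR of window predicates (same cost; alternative decomposition).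


-- ===== PORT A =====
def pvC1 : List String := ["because", "after", "as", "from", "for",
    "since", "with", "consequently", "therefore",
    "accordingly", "thus", "so", "hence", "affected", "will"]
def pvC2 : List String := ["because of", "due to", "for the reason that", "meant that", "prompted by",
    "helped by", "fuelled by", "partly on", "owing to"]
def pvC3 : List String := ["as a result", "as a consequence", "was aided by", "for this reason"]

-- A's literal loop body (what the port folds with)
def pvStep (toks : List String) (is_clue : List Bool) (p : Int × String) : List Bool :=
  let i := p.1
  let token := p.2
  let is_clue := if token ∈ pvC1 then PySem.List.pySetD is_clue i true else is_clue
  let is_clue :=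
    if 1 ≤ i then
      let prev1 := PySem.List.pyGetD toks (i - 1) ""
      if prev1 ++ " " ++ token ∈ pvC2 then
        PySem.List.pySetD (PySem.List.pySetD is_clue (i - 1) true) i true
      else is_clue
    else is_clue
  if 2 ≤ i then
    let prev2 := PySem.List.pyGetD toks (i - 2) ""
    let prev1 := PySem.List.pyGetD toks (i - 1) ""
    if prev2 ++ " " ++ prev1 ++ " " ++ token ∈ pvC3 then
      PySem.List.pySetD (PySem.List.pySetD (PySem.List.pySetD is_clue (i - 2) true) (i - 1) true) i true
    else is_clue
  else is_clue

def is_token_clue (doc : List String) : List Bool :=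
  let d := doc.map PySem.Str.lower
  let init := List.replicate d.length false
  (PySem.List.enumerate d 0).foldl (pvStep d) init

-- ===== PORT B =====
def is_token_clue_alt (doc : List String) : List Bool :=
  let toks := doc.map PySem.Str.lower
  let n := toks.length
  let big : Int → Bool := fun j =>
    decide (0 ≤ j) && decide (j + 1 < (n : Int)) &&
      decide (PySem.List.pyGetD toks j "" ++ " " ++ PySem.List.pyGetD toks (j + 1) "" ∈ pvC2)
  let tri : Int → Bool := fun j =>
    decide (0 ≤ j) && decide (j + 2 < (n : Int)) &&
      decide (PySem.List.pyGetD toks j "" ++ " " ++ PySem.List.pyGetD toks (j + 1) "" ++ " " ++ PySem.List.pyGetD toks (j + 2) "" ∈ pvC3)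
  (List.range n).map (fun i =>
    decide (toks.getD i "" ∈ pvC1)
    || big ((i : Int) - 1) || big (i : Int)
    || tri ((i : Int) - 2) || tri ((i : Int) - 1) || tri (i : Int))

-- ===== PRECONDITION & SPEC =====
def Spec_is_token_clue (doc : List String) (out : List Bool) : Prop := out = is_token_clue_alt doc
instance (doc : List String) (out : List Bool) : Decidable (Spec_is_token_clue doc out) := by unfold Spec_is_token_clue; infer_instance

-- ===== CLAIM (what is proved, stated in full; the proofs are below) =====
def Claim_equal_is_token_clue : Prop := ∀ (doc : List String), Dom_is_token_clue doc → Spec_is_token_clue doc (is_token_clue doc)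

-- ===== LEMMAS AND PROOFS =====

-- atoms: unigram / bigram / trigram window matches over the lowercased tokens
def pvUni (toks : List String) (k : Nat) : Bool := decide (toks.getD k "" ∈ pvC1)
def pvBg (toks : List String) (k : Nat) : Bool :=
  decide (toks.getD k "" ++ " " ++ toks.getD (k + 1) "" ∈ pvC2)
def pvTr (toks : List String) (k : Nat) : Bool :=
  decide (toks.getD k "" ++ " " ++ toks.getD (k + 1) "" ++ " " ++ toks.getD (k + 2) "" ∈ pvC3)

-- the mark position k carries after A has processed loop indices < m
def pvMark (toks : List String) (m k : Nat) : Bool :=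
  (decide (k < m) && pvUni toks k)
  || (decide (1 ≤ k) && decide (k < m) && pvBg toks (k - 1))
  || (decide (k + 1 < m) && pvBg toks k)
  || (decide (2 ≤ k) && decide (k < m) && pvTr toks (k - 2))
  || (decide (1 ≤ k) && decide (k + 1 < m) && pvTr toks (k - 1))
  || (decide (k + 2 < m) && pvTr toks k)

-- A's loop body at index m, over the Nat-indexed atoms
def pvGenStep (toks : List String) (ic : List Bool) (m : Nat) : List Bool :=
  let ic := if pvUni toks m then ic.set m true else ic
  let ic := if 1 ≤ m ∧ pvBg toks (m - 1) then (ic.set (m - 1) true).set m true else ic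
  if 2 ≤ m ∧ pvTr toks (m - 2) then (((ic.set (m - 2) true).set (m - 1) true).set m true) else ic

lemma pvStep_eq_gen (toks : List String) (ic : List Bool) (m : Nat) :
    pvStep toks ic ((m : Int), PySem.List.pyGetD toks (m : Int) "") = pvGenStep toks ic m := by
  unfold pvStep pvGenStep pvUni pvBg pvTr
  dsimp only
  by_cases h1 : 1 ≤ m
  · have c1 : (m : Int) - 1 = ((m - 1 : Nat) : Int) := by omega
    have em : m - 1 + 1 = m := by omega
    have i1 : (1:Int) ≤ (m:Int) := by omega
    by_cases h2 : 2 ≤ m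
    · have c2 : (m : Int) - 2 = ((m - 2 : Nat) : Int) := by omega
      have em2 : m - 2 + 1 = m - 1 := by omega
      have i2 : (2:Int) ≤ (m:Int) := by omega
      have em22 : m - 2 + 2 = m := by omega
      rw [if_pos i1, if_pos i2]
      simp only [h1, h2, true_and]
      simp [c1, c2, em, em2, em22]
    · have i2 : ¬ ((2:Int) ≤ (m:Int)) := by omega
      rw [if_pos i1, if_neg i2]
      simp only [h1, h2, true_and, false_and, if_false]
      simp [c1, em]
  · have hm0 : m = 0 := by omega
    subst hm0
    simp only [h1, false_and, if_false]
    simp [pysem, PySem.List.pyGetD_zero, PySem.List.pySetD_of_nonneg]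

set_option maxHeartbeats 1000000 in
lemma pvGenStep_mark (toks : List String) (m : Nat) (hm : m < toks.length) :
    pvGenStep toks ((List.range toks.length).map (pvMark toks m)) m
      = (List.range toks.length).map (pvMark toks (m + 1)) := by
  unfold pvGenStep
  dsimp only
  by_cases hm1 : 1 ≤ m
  · by_cases hm2 : 2 ≤ m
    · rcases Bool.eq_false_or_eq_true (pvUni toks m) with hu | hu <;>
      rcases Bool.eq_false_or_eq_true (pvBg toks (m - 1)) with hb | hb <;>
      rcases Bool.eq_false_or_eq_true (pvTr toks (m - 2)) with ht | ht <;>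
      simp only [hu, hb, ht, hm1, hm2, Bool.false_eq_true, true_and, and_true,
        and_false, false_and, if_true, if_false, ite_true, ite_false] <;>
      refine List.ext_getElem (by simp) ?_ <;>
      (intro k h1 h2
       simp only [List.length_map, List.length_range, List.length_set] at h1 h2) <;>
      (by_cases hk0 : m = k <;> by_cases hk1 : m = k + 1 <;> by_cases hk2 : m = k + 2 <;>
         first
         | omega
         | (simp_all [pvMark, List.getElem_set]; done)
         | (have e1 : (k ≤ m) ↔ (k < m) := by omega
            have e2 : (k + 1 ≤ m) ↔ (k + 1 < m) := by omega
            have e3 : (k + 2 ≤ m) ↔ (k + 2 < m) := by omega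
            have e4 : ¬ (m - 1 = k) := by omega
            have e5 : ¬ (m - 2 = k) := by omega
            simp_all [pvMark, List.getElem_set, Nat.lt_succ_iff, e1, e2, e3, e4, e5]; done)
         | (have e1 : (k ≤ m) ↔ (k < m) := by omega
            have e2 : (k + 1 ≤ m) ↔ (k + 1 < m) := by omega
            have e3 : (k + 2 ≤ m) ↔ (k + 2 < m) := by omega
            have e4 : ¬ (m - 1 = k) := by omega
            simp_all [pvMark, List.getElem_set, Nat.lt_succ_iff, e1, e2, e3, e4]; done)
         | (have e1 : (k ≤ m) ↔ (k < m) := by omega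
            have e2 : (k + 1 ≤ m) ↔ (k + 1 < m) := by omega
            have e3 : (k + 2 ≤ m) ↔ (k + 2 < m) := by omega
            simp_all [pvMark, List.getElem_set, Nat.lt_succ_iff, e1, e2, e3]))
    · rcases Bool.eq_false_or_eq_true (pvUni toks m) with hu | hu <;>
      rcases Bool.eq_false_or_eq_true (pvBg toks (m - 1)) with hb | hb <;>
      simp only [hu, hb, hm1, hm2, Bool.false_eq_true, true_and, and_true,
        and_false, false_and, if_true, if_false, ite_true, ite_false] <;>
      refine List.ext_getElem (by simp) ?_ <;>
      (intro k h1 h2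
       simp only [List.length_map, List.length_range, List.length_set] at h1 h2) <;>
      (by_cases hk0 : m = k <;> by_cases hk1 : m = k + 1 <;> by_cases hk2 : m = k + 2 <;>
         first
         | omega
         | (simp_all [pvMark, List.getElem_set]; done)
         | (have e1 : (k ≤ m) ↔ (k < m) := by omega
            have e2 : (k + 1 ≤ m) ↔ (k + 1 < m) := by omega
            have e3 : (k + 2 ≤ m) ↔ (k + 2 < m) := by omega
            have e4 : ¬ (m - 1 = k) := by omega
            have e5 : ¬ (m - 2 = k) := by omega
            simp_all [pvMark, List.getElem_set, Nat.lt_succ_iff, e1, e2, e3, e4, e5]; done)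
         | (have e1 : (k ≤ m) ↔ (k < m) := by omega
            have e2 : (k + 1 ≤ m) ↔ (k + 1 < m) := by omega
            have e3 : (k + 2 ≤ m) ↔ (k + 2 < m) := by omega
            have e4 : ¬ (m - 1 = k) := by omega
            simp_all [pvMark, List.getElem_set, Nat.lt_succ_iff, e1, e2, e3, e4]; done)
         | (have e1 : (k ≤ m) ↔ (k < m) := by omega
            have e2 : (k + 1 ≤ m) ↔ (k + 1 < m) := by omega
            have e3 : (k + 2 ≤ m) ↔ (k + 2 < m) := by omega
            simp_all [pvMark, List.getElem_set, Nat.lt_succ_iff, e1, e2, e3]))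
  · have hm0 : m = 0 := by omega
    subst hm0
    rcases Bool.eq_false_or_eq_true (pvUni toks 0) with hu | hu <;>
    simp only [hu, Bool.false_eq_true, true_and, and_true,
        and_false, false_and, if_true, if_false, ite_true, ite_false] <;>
    refine List.ext_getElem (by simp) ?_ <;>
    (intro k h1 h2
     simp only [List.length_map, List.length_range, List.length_set] at h1 h2) <;>
    (by_cases hk0 : k = 0 <;>
     first
     | (simp_all [pvMark, List.getElem_set]; done)
     | (simp_all [pvMark, List.getElem_set]; omega))

lemma pvInv (toks : List String) (m : Nat) (hm : m ≤ toks.length) :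
    (PySem.List.pyRange 0 (m : Int) 1).foldl
        (fun ic j => pvStep toks ic (j, PySem.List.pyGetD toks j ""))
        (List.replicate toks.length false)
      = (List.range toks.length).map (pvMark toks m) := by
  induction m with
  | zero =>
      rw [show ((0 : Nat) : Int) = 0 by norm_num, PySem.List.pyRange_one_eq_nil (by omega)]
      refine List.ext_getElem (by simp) ?_
      intro k h1 h2
      simp [pvMark]
  | succ m ih =>
      rw [show ((m + 1 : Nat) : Int) = (m : Int) + 1 by push_cast; ring,
        PySem.List.pyRange_one_succ_right (by omega), List.foldl_append]
      rw [ih (by omega)]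
      simp only [List.foldl_cons, List.foldl_nil]
      rw [pvStep_eq_gen]
      exact pvGenStep_mark toks m (by omega)

lemma pvAlt_point (toks : List String) (i : Nat) (hi : i < toks.length) :
    (decide (toks.getD i "" ∈ pvC1)
      || (decide (0 ≤ (i : Int) - 1) && decide ((i : Int) - 1 + 1 < (toks.length : Int)) &&
            decide (PySem.List.pyGetD toks ((i : Int) - 1) "" ++ " " ++ PySem.List.pyGetD toks ((i : Int) - 1 + 1) "" ∈ pvC2))
      || (decide (0 ≤ (i : Int)) && decide ((i : Int) + 1 < (toks.length : Int)) &&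
            decide (PySem.List.pyGetD toks (i : Int) "" ++ " " ++ PySem.List.pyGetD toks ((i : Int) + 1) "" ∈ pvC2))
      || (decide (0 ≤ (i : Int) - 2) && decide ((i : Int) - 2 + 2 < (toks.length : Int)) &&
            decide (PySem.List.pyGetD toks ((i : Int) - 2) "" ++ " " ++ PySem.List.pyGetD toks ((i : Int) - 2 + 1) "" ++ " " ++ PySem.List.pyGetD toks ((i : Int) - 2 + 2) "" ∈ pvC3))
      || (decide (0 ≤ (i : Int) - 1) && decide ((i : Int) - 1 + 2 < (toks.length : Int)) &&
            decide (PySem.List.pyGetD toks ((i : Int) - 1) "" ++ " " ++ PySem.List.pyGetD toks ((i : Int) - 1 + 1) "" ++ " " ++ PySem.List.pyGetD toks ((i : Int) - 1 + 2) "" ∈ pvC3))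
      || (decide (0 ≤ (i : Int)) && decide ((i : Int) + 2 < (toks.length : Int)) &&
            decide (PySem.List.pyGetD toks (i : Int) "" ++ " " ++ PySem.List.pyGetD toks ((i : Int) + 1) "" ++ " " ++ PySem.List.pyGetD toks ((i : Int) + 2) "" ∈ pvC3)))
      = pvMark toks toks.length i := by
  unfold pvMark pvUni pvBg pvTr
  have f2 : ((i : Int) + 1 < (toks.length : Int)) ↔ i + 1 < toks.length := by omega
  have f3 : ((i : Int) + 2 < (toks.length : Int)) ↔ i + 2 < toks.length := by omega
  have g0 : PySem.List.pyGetD toks (i : Int) "" = toks.getD i "" := by simp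
  have g1 : PySem.List.pyGetD toks ((i : Int) + 1) "" = toks.getD (i + 1) "" := by
    rw [show (i : Int) + 1 = ((i + 1 : Nat) : Int) by push_cast; ring]; simp only [PySem.List.pyGetD_natCast]
  have g2 : PySem.List.pyGetD toks ((i : Int) + 2) "" = toks.getD (i + 2) "" := by
    rw [show (i : Int) + 2 = ((i + 2 : Nat) : Int) by push_cast; ring]; simp only [PySem.List.pyGetD_natCast]
  by_cases h1 : 1 ≤ i
  · have c1 : (i : Int) - 1 = ((i - 1 : Nat) : Int) := by omega
    have e1 : i - 1 + 1 = i := by omega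
    have e12 : i - 1 + 2 = i + 1 := by omega
    have f1 : (0 ≤ (i : Int) - 1) ↔ True := by constructor <;> intro <;> [trivial; omega]
    have fb1 : ((i : Int) - 1 + 1 < (toks.length : Int)) ↔ i < toks.length := by omega
    have fb2 : ((i : Int) - 1 + 2 < (toks.length : Int)) ↔ i + 1 < toks.length := by omega
    by_cases h2 : 2 ≤ i
    · have c2 : (i : Int) - 2 = ((i - 2 : Nat) : Int) := by omega
      have e2 : i - 2 + 1 = i - 1 := by omega
      have e22 : i - 2 + 2 = i := by omega
      have f1' : (0 ≤ (i : Int) - 2) ↔ True := by constructor <;> intro <;> [trivial; omega]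
      have fc : ((i : Int) - 2 + 2 < (toks.length : Int)) ↔ i < toks.length := by omega
      have gm21 : PySem.List.pyGetD toks (((i - 2 : Nat) : Int) + 1) "" = toks.getD (i - 1) "" := by
        rw [show ((i - 2 : Nat) : Int) + 1 = ((i - 1 : Nat) : Int) by omega]
        simp only [PySem.List.pyGetD_natCast]
      have gm12 : PySem.List.pyGetD toks (((i - 1 : Nat) : Int) + 2) "" = toks.getD (i + 1) "" := by
        rw [show ((i - 1 : Nat) : Int) + 2 = ((i + 1 : Nat) : Int) by omega]
        simp only [PySem.List.pyGetD_natCast]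
      have fb2' : (((i - 1 : Nat) : Int) + 2 < (toks.length : Int)) ↔ i + 1 < toks.length := by omega
      have fc' : (((i - 2 : Nat) : Int) + 2 < (toks.length : Int)) ↔ i < toks.length := by omega
      simp only [c1, c2, f1, f1', f2, f3, fb1, fb2, fc, g0, g1, g2, gm21, gm12, fb2', fc',
        PySem.List.pyGetD_natCast, e1, e12, e2, e22]
      simp [List.getD_eq_getElem?_getD, h1, h2, hi]
    · have i1 : i = 1 := by omega
      subst i1
      have f1' : (0 ≤ (1 : Int) - 2) ↔ False := by norm_num
      simp only [c1, f1, f1', f2, f3, fb1, fb2, g0, g1, g2,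
        PySem.List.pyGetD_natCast, e1, e12] at *
      have hA : PySem.List.pyGetD toks (1 : Int) "" = toks.getD 1 "" := by
        rw [show (1 : Int) = ((1 : Nat) : Int) by norm_num]; simp only [PySem.List.pyGetD_natCast]
      have hB : PySem.List.pyGetD toks (2 : Int) "" = toks.getD 2 "" := by
        rw [show (2 : Int) = ((2 : Nat) : Int) by norm_num]; simp only [PySem.List.pyGetD_natCast]
      have hC : PySem.List.pyGetD toks (3 : Int) "" = toks.getD 3 "" := by
        rw [show (3 : Int) = ((3 : Nat) : Int) by norm_num]; simp only [PySem.List.pyGetD_natCast]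
      have hZ : PySem.List.pyGetD toks (0 : Int) "" = toks.getD 0 "" := by
        rw [show (0 : Int) = ((0 : Nat) : Int) by norm_num]; simp only [PySem.List.pyGetD_natCast]
      simp [List.getD_eq_getElem?_getD, hA, hB, hC, hZ, hi, h2]
  · have i0 : i = 0 := by omega
    subst i0
    have f1 : (0 ≤ (0 : Int) - 1) ↔ False := by norm_num
    have f1' : (0 ≤ (0 : Int) - 2) ↔ False := by norm_num
    simp only [f1, f1', f2, f3, g0, g1, g2] at *
    have hA : PySem.List.pyGetD toks (1 : Int) "" = toks.getD 1 "" := by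
      rw [show (1 : Int) = ((1 : Nat) : Int) by norm_num]; simp only [PySem.List.pyGetD_natCast]
    have hB : PySem.List.pyGetD toks (2 : Int) "" = toks.getD 2 "" := by
      rw [show (2 : Int) = ((2 : Nat) : Int) by norm_num]; simp only [PySem.List.pyGetD_natCast]
    have hC : PySem.List.pyGetD toks (3 : Int) "" = toks.getD 3 "" := by
      rw [show (3 : Int) = ((3 : Nat) : Int) by norm_num]; simp only [PySem.List.pyGetD_natCast]
    have hZ : PySem.List.pyGetD toks (0 : Int) "" = toks.getD 0 "" := by
      rw [show (0 : Int) = ((0 : Nat) : Int) by norm_num]; simp only [PySem.List.pyGetD_natCast]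
    simp [List.getD_eq_getElem?_getD, hA, hB, hC, hZ, hi, h1]

lemma pv_main (doc : List String) : is_token_clue doc = is_token_clue_alt doc := by
  unfold is_token_clue is_token_clue_alt
  dsimp only
  rw [PySem.List.enumerate_eq_map_pyRange (d := "")]
  rw [List.foldl_map]
  rw [PySem.List.len_eq]
  rw [pvInv (doc.map PySem.Str.lower) (doc.map PySem.Str.lower).length (le_refl _)]
  refine (List.map_congr_left ?_).symm
  intro i hi
  rw [List.mem_range] at hi
  exact pvAlt_point (doc.map PySem.Str.lower) i hi

-- ===== VERDICT (by name: the statement is the Claim_ definition above) =====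
theorem is_token_clue_spec : Claim_equal_is_token_clue := by
  intro doc _
  unfold Spec_is_token_clue
  exact pv_main doc
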